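-- pv_equiv track=rewrite | github.com/TDSine/SRO-ML-Nav | modules/functions.py | analyze_successful_routes
-- ===== SOURCE A (Python) =====
-- def analyze_successful_routes(successful_routes):
--     action_patterns = {}
--     for route in successful_routes:
--         for index, action in enumerate(route):
--             if index not in action_patterns:
--                 action_patterns[index] = {}
--             if action not in action_patterns[index]:
--                 action_patterns[index][action] = 0
--             action_patterns[index][action] += 1
--     return action_patterns
-- ===== SOURCE B (Python) =====
-- def analyze_successful_routes(successful_routes):
--     routes = [list(route) for route in successful_routes]
--     longest = 0
--     for route in routes:
--         longest = max(longest, len(route))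
--     result = {}
--     for i in range(longest):
--         counts = {}
--         for route in routes:
--             if i < len(route):
--                 action = route[i]
--                 counts[action] = counts.get(action, 0) + 1
--         result[i] = counts
--     return result
-- ===== Notes on version B (the rewrite author's own statement) =====
-- stated objective: alternative
-- what changed: Position-major traversal: compute the maximum route length, then for each position build its action counter in one scan over all routes, instead of A's route-major nested loop that creates/updates nested dict entries with membership tests.
import Mathlib
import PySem

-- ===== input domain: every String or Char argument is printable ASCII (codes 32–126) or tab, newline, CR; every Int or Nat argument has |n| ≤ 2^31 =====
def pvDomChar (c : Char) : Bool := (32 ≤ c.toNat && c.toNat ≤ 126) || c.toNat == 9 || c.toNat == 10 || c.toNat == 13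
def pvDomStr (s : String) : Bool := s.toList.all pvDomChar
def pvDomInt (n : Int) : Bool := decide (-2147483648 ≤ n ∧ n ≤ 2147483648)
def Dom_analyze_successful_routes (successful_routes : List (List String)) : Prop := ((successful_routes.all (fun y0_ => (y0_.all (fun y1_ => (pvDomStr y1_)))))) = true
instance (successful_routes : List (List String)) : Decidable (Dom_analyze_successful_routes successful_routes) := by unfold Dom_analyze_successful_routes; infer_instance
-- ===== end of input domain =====

-- B replaces A's route-major nested-dict loop by a position-major transpose scan (same results, same cost class).

-- ===== PORT A =====
def analyze_successful_routes (successful_routes : List (List String)) : List (Int × List (String × Int)) :=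
  let action_patterns : PySem.Dict Int (PySem.Dict String Int) :=
    successful_routes.foldl (fun d route =>
      (PySem.List.enumerate route).foldl (fun d ia =>
        let index := ia.1
        let action := ia.2
        -- if index not in action_patterns: action_patterns[index] = {}
        let d := if d.contains index then d else d.insert index PySem.Dict.empty
        let inner := d.getD index PySem.Dict.empty
        -- if action not in action_patterns[index]: action_patterns[index][action] = 0
        let inner := if inner.contains action then inner else inner.insert action 0
        -- action_patterns[index][action] += 1 (mutation of the inner dict, written back in place)
        let inner := inner.insert action (inner.getD action 0 + 1)
        d.insert index inner) d)
      PySem.Dict.empty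
  action_patterns.items.map (fun p => (p.1, p.2.items))

-- ===== PORT B =====
def analyze_successful_routes_alt (successful_routes : List (List String)) : List (Int × List (String × Int)) :=
  let routes := successful_routes
  let longest : Int := routes.foldl (fun m route => max m (route.length : Int)) 0
  let result : PySem.Dict Int (PySem.Dict String Int) :=
    (PySem.List.pyRange 0 longest).foldl (fun res i =>
      let counts : PySem.Dict String Int :=
        routes.foldl (fun c route =>
          if i < (route.length : Int) then
            -- route[i]: exact, the guard puts i in range, so the default "" is never used
            let action := PySem.List.pyGetD route i ""
            c.insert action (c.getD action 0 + 1)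
          else c) PySem.Dict.empty
      res.insert i counts) PySem.Dict.empty
  result.items.map (fun p => (p.1, p.2.items))

-- ===== PRECONDITION & SPEC =====
def Spec_analyze_successful_routes (successful_routes : List (List String)) (out : List (Int × List (String × Int))) : Prop := out = analyze_successful_routes_alt successful_routes
instance (successful_routes : List (List String)) (out : List (Int × List (String × Int))) : Decidable (Spec_analyze_successful_routes successful_routes out) := by unfold Spec_analyze_successful_routes; infer_instance

-- ===== CLAIM (what is proved, stated in full; the proofs are below) =====
def Claim_equal_analyze_successful_routes : Prop := ∀ (successful_routes : List (List String)), Dom_analyze_successful_routes successful_routes → Spec_analyze_successful_routes successful_routes (analyze_successful_routes successful_routes)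

-- ===== LEMMAS AND PROOFS =====

-- A's inner-loop step, named for the proofs
def pvStepA (d : PySem.Dict Int (PySem.Dict String Int)) (ia : Int × String) : PySem.Dict Int (PySem.Dict String Int) :=
  let index := ia.1
  let action := ia.2
  let d := if d.contains index then d else d.insert index PySem.Dict.empty
  let inner := d.getD index PySem.Dict.empty
  let inner := if inner.contains action then inner else inner.insert action 0
  let inner := inner.insert action (inner.getD action 0 + 1)
  d.insert index inner

-- the actions found at position j, in route order
def pvCol (j : Nat) (rs : List (List String)) : List String :=
  (rs.filter (fun r => decide (j < r.length))).map (fun r => r.getD j "")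

-- maximum route length
def pvMax (rs : List (List String)) : Nat := rs.foldl (fun m r => max m r.length) 0

-- the canonical dict both programs build: keys 0..m-1, value at j = counter of c j
def pvD (m : Nat) (c : Nat → List String) : PySem.Dict Int (PySem.Dict String Int) :=
  PySem.Dict.mk ((List.range m).map (fun j : Nat => ((j : Int), PySem.Dict.counter (c j))))

lemma pvD_congr (m : Nat) (c c' : Nat → List String) (h : ∀ j, j < m → c j = c' j) :
    pvD m c = pvD m c' := by
  unfold pvD
  congr 1
  exact List.map_congr_left (fun j hj => by rw [h j (List.mem_range.mp hj)])

lemma keys_pvD (m : Nat) (c : Nat → List String) :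
    (pvD m c).keys = (List.range m).map (fun j : Nat => (j : Int)) := by
  simp only [pvD, PySem.Dict.keys, List.map_map]
  rfl

lemma nodup_keys_pvD (m : Nat) (c : Nat → List String) : (pvD m c).keys.Nodup := by
  rw [keys_pvD]
  refine List.Nodup.map ?_ List.nodup_range
  intro a b h
  simpa using h

lemma contains_pvD (m : Nat) (c : Nat → List String) (k : Nat) :
    (pvD m c).contains (k : Int) = decide (k < m) := by
  rw [PySem.Dict.contains_eq_decide_mem_keys, keys_pvD]
  simp

lemma getD_pvD (m : Nat) (c : Nat → List String) (k : Nat) (h : k < m) (x : PySem.Dict String Int) :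
    (pvD m c).getD (k : Int) x = PySem.Dict.counter (c k) := by
  exact PySem.Dict.getD_of_mem_items (pvD m c)
    (by exact List.mem_map.mpr ⟨k, List.mem_range.mpr h, rfl⟩) (nodup_keys_pvD m c) x

lemma insert_pvD_lt (m : Nat) (c : Nat → List String) (k : Nat) (h : k < m) (l : List String) :
    (pvD m c).insert (k : Int) (PySem.Dict.counter l) = pvD m (Function.update c k l) := by
  have hc : (pvD m c).contains (k : Int) = true := by
    rw [contains_pvD]; simpa using h
  apply PySem.Dict.ext
  rw [PySem.Dict.items_insert_of_contains _ _ hc]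
  show List.map _ (List.map _ (List.range m)) = List.map _ (List.range m)
  rw [List.map_map]
  refine List.map_congr_left ?_
  intro j _
  simp only [Function.comp_apply]
  by_cases hjk : j = k
  · subst hjk
    simp [Function.update]
  · have hb : (((j : Nat) : Int) == ((k : Nat) : Int)) = false := by
      simp [hjk]
    simp [hb, Function.update, hjk]

lemma insert_pvD_eq (m : Nat) (c : Nat → List String) (h : c m = []) :
    (pvD m c).insert (m : Int) PySem.Dict.empty = pvD (m + 1) c := by
  have hc : (pvD m c).contains (m : Int) = false := by
    rw [contains_pvD]; simp
  apply PySem.Dict.ext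
  rw [PySem.Dict.items_insert_of_not_contains _ _ hc]
  show List.map _ (List.range m) ++ _ = List.map _ (List.range (m + 1))
  rw [List.range_succ, List.map_append]
  simp [h, PySem.Dict.counter]

lemma counter_snoc {κ : Type} [BEq κ] (xs : List κ) (a : κ) :
    PySem.Dict.counter (xs ++ [a])
      = (PySem.Dict.counter xs).insert a ((PySem.Dict.counter xs).getD a 0 + 1) := by
  rw [← PySem.Dict.foldl_insert_getD_add_one_eq_counter, ← PySem.Dict.foldl_insert_getD_add_one_eq_counter,
    List.foldl_append]
  simp

-- the two membership branches of A's inner body collapse to one insert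
lemma inner_branches (inner : PySem.Dict String Int) (a : String) :
    (if inner.contains a then inner else inner.insert a 0).insert a
        ((if inner.contains a then inner else inner.insert a 0).getD a 0 + 1)
      = inner.insert a (inner.getD a 0 + 1) := by
  by_cases h : inner.contains a = true
  · simp [h]
  · simp only [Bool.not_eq_true] at h
    simp [h, PySem.Dict.getD_insert_self, PySem.Dict.insert_insert_self,
      PySem.Dict.getD_of_not_contains inner 0 h]

-- one execution of A's inner-loop body on the canonical dict
lemma pvStepA_pvD (m k : Nat) (c : Nat → List String) (a : String) (hk : k ≤ m)
    (hc : ∀ j, m ≤ j → c j = []) :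
    pvStepA (pvD m c) ((k : Int), a)
      = pvD (max m (k + 1)) (Function.update c k (c k ++ [a])) := by
  unfold pvStepA
  by_cases hkm : k < m
  · have hcon : (pvD m c).contains ((k : Nat) : Int) = true := by
      rw [contains_pvD]; simpa using hkm
    simp only [hcon, if_true]
    rw [getD_pvD m c k hkm, inner_branches, ← counter_snoc, insert_pvD_lt m c k hkm,
      Nat.max_eq_left (by omega)]
  · have hkm' : k = m := Nat.le_antisymm hk (Nat.not_lt.mp hkm)
    subst hkm'
    have hcon : (pvD k c).contains ((k : Nat) : Int) = false := by
      rw [contains_pvD]; simp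
    simp only [hcon, Bool.false_eq_true, if_false]
    rw [insert_pvD_eq k c (hc k le_rfl), getD_pvD (k + 1) c k (by omega),
      inner_branches, ← counter_snoc, insert_pvD_lt (k + 1) c k (by omega),
      Nat.max_eq_right (by omega)]

-- main inner-loop invariant: processing one route from start index k
lemma innerFold_pvD (r : List String) :
    ∀ (k m : Nat) (c : Nat → List String), k ≤ m → (∀ j, m ≤ j → c j = []) →
    (PySem.List.enumerate r (k : Int)).foldl pvStepA (pvD m c)
      = pvD (max m (k + r.length))
          (fun j => if k ≤ j ∧ j < k + r.length then c j ++ [r.getD (j - k) ""] else c j) := by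
  induction r with
  | nil =>
    intro k m c hk hc
    simp only [PySem.List.enumerate, List.foldl_nil, List.length_nil, Nat.add_zero]
    rw [Nat.max_eq_left hk]
    refine pvD_congr m _ _ (fun j hj => ?_)
    have hno : ¬(k ≤ j ∧ j < k) := by omega
    simp [hno]
  | cons a t ih =>
    intro k m c hk hc
    have hcons : PySem.List.enumerate (a :: t) (k : Int)
        = ((k : Int), a) :: PySem.List.enumerate t ((k : Int) + 1) := rfl
    have hcast : ((k : Int) + 1) = (((k + 1 : Nat)) : Int) := by push_cast; ring
    have hc2 : ∀ j, max m (k + 1) ≤ j → Function.update c k (c k ++ [a]) j = [] := by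
      intro j hj
      have hjk : j ≠ k := by omega
      have := hc j (by omega)
      simp [Function.update, hjk, this]
    rw [hcons, List.foldl_cons, pvStepA_pvD m k c a hk hc, hcast,
      ih (k + 1) (max m (k + 1)) _ (le_max_right _ _) hc2]
    have hM : max (max m (k + 1)) (k + 1 + t.length) = max m (k + (a :: t).length) := by
      simp only [List.length_cons]; omega
    rw [hM]
    refine pvD_congr _ _ _ (fun j hj => ?_)
    simp only [List.length_cons]
    by_cases hjk : j = k
    · rw [if_neg (by omega), if_pos (by omega : k ≤ j ∧ j < k + (t.length + 1))]
      simp [hjk, Function.update]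
    · by_cases hjr : k + 1 ≤ j ∧ j < k + 1 + t.length
      · rw [if_pos hjr, if_pos (by omega : k ≤ j ∧ j < k + (t.length + 1))]
        have hidx : j - k = (j - (k + 1)) + 1 := by omega
        rw [hidx]
        simp [Function.update, hjk]
      · rw [if_neg hjr, if_neg (by omega : ¬(k ≤ j ∧ j < k + (t.length + 1)))]
        simp [Function.update, hjk]

-- outer invariant for A
lemma outerA_pvD (rs : List (List String)) :
    rs.foldl (fun d route => (PySem.List.enumerate route).foldl pvStepA d) PySem.Dict.empty
      = pvD (pvMax rs) (fun j => pvCol j rs) := by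
  induction rs using List.reverseRecOn with
  | nil => rfl
  | append_singleton rs r ih =>
    rw [List.foldl_append, ih, List.foldl_cons, List.foldl_nil]
    have hc : ∀ j, pvMax rs ≤ j → pvCol j rs = [] := by
      intro j hj
      unfold pvCol
      have hall : ∀ r' ∈ rs, ¬((fun r' => decide (j < r'.length)) r' = true) := by
        intro r' hr'
        have := (PySem.List.le_foldl_max_nat rs (fun r => r.length) 0).2 r' hr'
        unfold pvMax at hj
        simp only [decide_eq_true_eq]
        omega
      rw [List.filter_eq_nil_iff.mpr hall]
      rfl
    rw [show PySem.List.enumerate r = PySem.List.enumerate r (((0 : Nat)) : Int) from rfl,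
      innerFold_pvD r 0 (pvMax rs) _ (Nat.zero_le _) hc]
    have hmax : max (pvMax rs) (0 + r.length) = pvMax (rs ++ [r]) := by
      unfold pvMax
      rw [List.foldl_append]
      simp
    rw [hmax]
    refine pvD_congr _ _ _ (fun j hj => ?_)
    simp only [pvCol, List.filter_append, List.map_append, Nat.zero_add, Nat.sub_zero,
      Nat.zero_le, true_and]
    by_cases hjr : j < r.length
    · rw [if_pos hjr]
      simp [hjr]
    · rw [if_neg hjr]
      simp [hjr]

-- B's dict equals the canonical dict
lemma B_pvD (rs : List (List String)) :
    (PySem.List.pyRange 0 (rs.foldl (fun m route => max m (route.length : Int)) 0)).foldl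
      (fun res i =>
        res.insert i
          (rs.foldl (fun c route =>
            if i < (route.length : Int) then
              c.insert (PySem.List.pyGetD route i "")
                ((c.getD (PySem.List.pyGetD route i "") 0) + 1)
            else c) PySem.Dict.empty)) PySem.Dict.empty
      = pvD (pvMax rs) (fun j => pvCol j rs) := by
  have hlong : rs.foldl (fun m route => max m (route.length : Int)) 0
      = ((pvMax rs : Nat) : Int) := by
    have hgen : ∀ n : Nat, rs.foldl (fun m route => max m (route.length : Int)) (n : Int)
        = ((rs.foldl (fun m r => max m r.length) n : Nat) : Int) := by
      induction rs with
      | nil => intro n; rfl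
      | cons r t iht =>
        intro n
        simp only [List.foldl_cons]
        rw [show (max (n : Int) (r.length : Int)) = (((max n r.length : Nat)) : Int) from
          (Nat.cast_max ..).symm]
        exact iht _
    exact hgen 0
  rw [hlong, PySem.List.pyRange_zero_natCast, List.foldl_map]
  have hcnt : ∀ jn : Nat,
      rs.foldl (fun c route =>
        if ((jn : Nat) : Int) < (route.length : Int) then
          c.insert (PySem.List.pyGetD route ((jn : Nat) : Int) "")
            ((c.getD (PySem.List.pyGetD route ((jn : Nat) : Int) "") 0) + 1)
        else c) PySem.Dict.empty = PySem.Dict.counter (pvCol jn rs) := by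
    intro jn
    have hbody : ∀ (c : PySem.Dict String Int), ∀ route ∈ rs,
        (if ((jn : Nat) : Int) < (route.length : Int) then
          c.insert (PySem.List.pyGetD route ((jn : Nat) : Int) "")
            ((c.getD (PySem.List.pyGetD route ((jn : Nat) : Int) "") 0) + 1)
        else c)
        = (if jn < route.length then
            c.insert (route.getD jn "") ((c.getD (route.getD jn "") 0) + 1)
          else c) := by
      intro c route _
      rw [PySem.List.pyGetD_natCast]
      by_cases hj : jn < route.length
      · rw [if_pos (by exact_mod_cast hj), if_pos hj]
      · rw [if_neg (by exact_mod_cast hj), if_neg hj]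
    rw [PySem.List.foldl_congr_mem rs _ _ _ hbody,
      PySem.List.foldl_ite_eq_foldl_filter (fun route : List String => jn < route.length)
        (fun (c : PySem.Dict String Int) route =>
          c.insert (route.getD jn "") ((c.getD (route.getD jn "") 0) + 1))
        rs PySem.Dict.empty,
      ← PySem.Dict.foldl_insert_getD_add_one_eq_counter]
    unfold pvCol
    rw [List.foldl_map]
  rw [PySem.List.foldl_congr_mem _ _
    (fun res jn => res.insert ((jn : Nat) : Int) (PySem.Dict.counter (pvCol jn rs))) _
    (fun acc x _ => by rw [hcnt])]
  apply PySem.Dict.ext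
  rw [PySem.Dict.items_foldl_insert_fresh (List.range (pvMax rs))
    (fun jn : Nat => ((jn : Nat) : Int)) (fun jn => PySem.Dict.counter (pvCol jn rs))
    PySem.Dict.empty (fun a _ => by simp [pysem])
    (by refine List.Nodup.map ?_ List.nodup_range; intro a b hab; simpa using hab)]
  rfl
-- ===== VERDICT (by name: the statement is the Claim_ definition above) =====
theorem analyze_successful_routes_spec : Claim_equal_analyze_successful_routes := by
  intro rs _
  exact ((congrArg (fun d : PySem.Dict Int (PySem.Dict String Int) =>
      d.items.map (fun p => (p.1, p.2.items))) (outerA_pvD rs)).trans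
    (congrArg (fun d : PySem.Dict Int (PySem.Dict String Int) =>
      d.items.map (fun p => (p.1, p.2.items))) (B_pvD rs)).symm)
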